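-- pv_equiv track=rewrite | github.com/WyattMeehanSmoothStack/PythonProjects | PythonProjects/ss/python/four/Day_4_a.py | first_forth
-- ===== SOURCE A (Python) =====
-- def first_forth(cap_str):
--     new_cap = ""
--     for x in range(0,len(cap_str)):
--         if x == 0 or x == 3:
--             new_cap += cap_str[x].upper()
--         else:
--             new_cap += cap_str[x]
--     return new_cap
-- ===== SOURCE B (Python) =====
-- def first_forth(cap_str):
--     chars = list(cap_str)
--     if chars:
--         chars[0] = chars[0].upper()
--     if len(chars) > 3:
--         chars[3] = chars[3].upper()
--     return "".join(chars)
-- ===== Notes on version B (the rewrite author's own statement) =====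
-- stated objective: simpler
-- what changed: Replaced the full-length index loop with a branch and string += at every character by direct positional assignment: convert to a char list, uppercase positions 0 and 3 under length guards, and join once.
import Mathlib
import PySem

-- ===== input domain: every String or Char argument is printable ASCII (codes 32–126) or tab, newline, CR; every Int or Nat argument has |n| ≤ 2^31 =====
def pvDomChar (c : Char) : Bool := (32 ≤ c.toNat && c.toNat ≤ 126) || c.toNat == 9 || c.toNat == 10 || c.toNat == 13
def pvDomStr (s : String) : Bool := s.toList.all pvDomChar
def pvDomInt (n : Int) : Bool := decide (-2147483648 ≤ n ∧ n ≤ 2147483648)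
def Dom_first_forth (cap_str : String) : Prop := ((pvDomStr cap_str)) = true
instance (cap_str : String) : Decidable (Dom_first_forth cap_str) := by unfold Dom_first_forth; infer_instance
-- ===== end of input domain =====

-- B uppercases positions 0 and 3 by direct assignment with length guards instead of A's full scan; objective: simpler.

-- ===== PORT A =====
def first_forth (cap_str : String) : String :=
  let cs := cap_str.toList
  String.ofList ((PySem.List.pyRange 0 (PySem.List.len cs) 1).foldl
    (fun new_cap x =>
      if x == 0 || x == 3 then
        new_cap ++ [PySem.Chars.upperChar (PySem.List.pyGetD cs x ' ')]
      else
        new_cap ++ [PySem.List.pyGetD cs x ' ']) [])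

-- ===== PORT B =====
def first_forth_alt (cap_str : String) : String :=
  let chars := cap_str.toList
  let chars := if chars.isEmpty then chars else chars.set 0 (PySem.Chars.upperChar (chars.getD 0 ' '))
  let chars := if 3 < chars.length then chars.set 3 (PySem.Chars.upperChar (chars.getD 3 ' ')) else chars
  String.ofList chars

-- ===== PRECONDITION & SPEC =====
def Spec_first_forth (cap_str : String) (out : String) : Prop := out = first_forth_alt cap_str
instance (cap_str : String) (out : String) : Decidable (Spec_first_forth cap_str out) := by unfold Spec_first_forth; infer_instance

-- ===== CLAIM (what is proved, stated in full; the proofs are below) =====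
def Claim_equal_first_forth : Prop := ∀ (cap_str : String), Dom_first_forth cap_str → Spec_first_forth cap_str (first_forth cap_str)

-- ===== LEMMAS AND PROOFS =====

-- the tail of A's loop (indices ≥ 4) just copies characters
theorem pv_tail (cs : List Char) (init : List Char) :
    (PySem.List.pyRange 4 (PySem.List.len cs) 1).foldl
      (fun new_cap x =>
        if x == 0 || x == 3 then
          new_cap ++ [PySem.Chars.upperChar (PySem.List.pyGetD cs x ' ')]
        else
          new_cap ++ [PySem.List.pyGetD cs x ' ']) init = init ++ cs.drop 4 := by
  rw [PySem.List.foldl_congr_mem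
    (g := fun new_cap x => new_cap ++ [PySem.List.pyGetD cs x ' '])]
  · have h := PySem.List.foldl_pyRange_pyGetD (xs := cs) (d := ' ')
      (f := fun acc c => acc ++ [c]) (init := init) (a := 4) (by norm_num)
    rw [h]
    exact PySem.List.foldl_append_singleton_eq_self _ _
  · intro acc x hx
    have h4 : (4:Int) ≤ x := (PySem.List.mem_pyRange_one.mp hx).1
    have h0 : (x == (0:Int)) = false := by simp; omega
    have h3 : (x == (3:Int)) = false := by simp; omega
    simp [h0, h3]

theorem pv_core (cap_str : String) : first_forth cap_str = first_forth_alt cap_str := by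
  unfold first_forth first_forth_alt
  match h : cap_str.toList with
  | [] => simp [PySem.List.len]
  | [a] =>
    simp [PySem.List.len, show PySem.List.pyRange 0 1 1 = [0] from rfl,
      List.foldl, PySem.List.pyGetD, PySem.List.pyGet?, PySem.List.pyIdx?]
  | [a,b] =>
    simp [PySem.List.len, show PySem.List.pyRange 0 2 1 = [0,1] from rfl,
      List.foldl, PySem.List.pyGetD, PySem.List.pyGet?, PySem.List.pyIdx?]
  | [a,b,c] =>
    simp [PySem.List.len, show PySem.List.pyRange 0 3 1 = [0,1,2] from rfl,
      List.foldl, PySem.List.pyGetD, PySem.List.pyGet?, PySem.List.pyIdx?]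
  | a :: b :: c :: d :: rest =>
    dsimp only
    have hsplit : PySem.List.pyRange 0 (PySem.List.len (a :: b :: c :: d :: rest)) 1
        = PySem.List.pyRange 0 4 1 ++ PySem.List.pyRange 4 (PySem.List.len (a :: b :: c :: d :: rest)) 1 := by
      apply PySem.List.pyRange_one_append
      · norm_num
      · simp [PySem.List.len]; omega
    rw [hsplit, List.foldl_append]
    rw [show PySem.List.pyRange 0 4 1 = [0,1,2,3] from rfl]
    simp only [List.foldl]
    rw [pv_tail]
    simp [PySem.List.pyGetD, PySem.List.pyGet?, PySem.List.pyIdx?, List.set]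
    split_ifs <;> simp_all <;> omega

-- ===== VERDICT (by name: the statement is the Claim_ definition above) =====
theorem first_forth_spec : Claim_equal_first_forth := by
  intro s _
  exact pv_core s
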